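-- pv_equiv track=rewrite | github.com/pperkovich1/Romero_VAE_DCA | utils.py | generate_limits
-- ===== SOURCE A (Python) =====
-- def generate_limits(unique_aa_num, keep=[]):
--     lims = []
--     i = 0
--     for pos,aa_num in enumerate(unique_aa_num):
--         if pos not in keep:
--             pass
--         else:
--             lims.append([i,i+aa_num])
--             i += aa_num
--     return lims
-- ===== SOURCE B (Python) =====
-- def generate_limits(unique_aa_num, keep=[]):
--     kept = [aa for pos, aa in enumerate(unique_aa_num) if pos in keep]
--     ends = []
--     t = 0
--     for aa in kept:
--         t += aa
--         ends.append(t)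
--     return [[e - aa, e] for aa, e in zip(kept, ends)]
-- ===== Notes on version B (the rewrite author's own statement) =====
-- stated objective: alternative
-- what changed: Replaced the single loop that threads a running index and appends interval pairs with a filter pass (kept counts), a prefix-sum pass (ends), and a zip to form [end-aa, end] pairs.
import Mathlib
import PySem

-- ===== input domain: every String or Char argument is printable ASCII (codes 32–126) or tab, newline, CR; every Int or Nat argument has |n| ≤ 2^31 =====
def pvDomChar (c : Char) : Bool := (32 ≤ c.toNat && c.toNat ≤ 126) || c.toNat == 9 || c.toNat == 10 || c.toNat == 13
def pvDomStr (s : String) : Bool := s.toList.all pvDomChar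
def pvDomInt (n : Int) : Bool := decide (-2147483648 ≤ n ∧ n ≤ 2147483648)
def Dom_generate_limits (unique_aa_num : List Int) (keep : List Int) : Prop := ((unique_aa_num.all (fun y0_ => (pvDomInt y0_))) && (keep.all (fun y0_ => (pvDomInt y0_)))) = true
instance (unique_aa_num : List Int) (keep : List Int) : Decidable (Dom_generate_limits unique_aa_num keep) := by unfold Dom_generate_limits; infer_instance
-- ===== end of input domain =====

-- B replaces A's single loop threading a running index with a filter pass, a prefix-sum pass, and a zip; same values, same cost.


-- ===== PORT A =====
-- lims = []; i = 0; for pos, aa_num in enumerate(unique_aa_num): if pos not in keep: pass else: append [i, i+aa_num]; i += aa_num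
def generate_limits (unique_aa_num : List Int) (keep : List Int) : List (List Int) :=
  ((PySem.List.enumerate unique_aa_num 0).foldl
    (fun (st : List (List Int) × Int) pa =>
      if pa.1 ∉ keep then st
      else (st.1 ++ [[st.2, st.2 + pa.2]], st.2 + pa.2))
    ([], 0)).1

-- ===== PORT B =====
-- prefix sums: ends = []; t = 0; for aa in kept: t += aa; ends.append(t)
def pvAccum (t : Int) : List Int → List Int
  | [] => []
  | a :: r => (t + a) :: pvAccum (t + a) r

def generate_limits_alt (unique_aa_num : List Int) (keep : List Int) : List (List Int) :=
  let kept := ((PySem.List.enumerate unique_aa_num 0).filter (fun pa => decide (pa.1 ∈ keep))).map Prod.snd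
  let ends := pvAccum 0 kept
  (kept.zip ends).map (fun p => [p.2 - p.1, p.2])

-- ===== PRECONDITION & SPEC =====
def Spec_generate_limits (unique_aa_num : List Int) (keep : List Int) (out : List (List Int)) : Prop := out = generate_limits_alt unique_aa_num keep
instance (unique_aa_num : List Int) (keep : List Int) (out : List (List Int)) : Decidable (Spec_generate_limits unique_aa_num keep out) := by unfold Spec_generate_limits; infer_instance

-- ===== CLAIM (what is proved, stated in full; the proofs are below) =====
def Claim_equal_generate_limits : Prop := ∀ (unique_aa_num : List Int) (keep : List Int), Dom_generate_limits unique_aa_num keep → Spec_generate_limits unique_aa_num keep (generate_limits unique_aa_num keep)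

-- ===== LEMMAS AND PROOFS =====

-- A's fold with the "pos not in keep → skip" branch equals the plain fold over the kept counts
lemma foldl_skip_eq_foldl_filter_map (keep : List Int) (f : (List (List Int) × Int) → Int → (List (List Int) × Int)) :
    ∀ (l : List (Int × Int)) (init : List (List Int) × Int),
      l.foldl (fun st pa => if pa.1 ∉ keep then st else f st pa.2) init
      = ((l.filter (fun pa => decide (pa.1 ∈ keep))).map Prod.snd).foldl f init := by
  intro l
  induction l with
  | nil => intro init; rfl
  | cons a t ih =>
    intro init
    simp only [List.foldl_cons, List.filter_cons]
    by_cases h : a.1 ∈ keep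
    · rw [if_neg (not_not_intro h), ih (f init a.2)]
      simp [h]
    · rw [if_pos h, ih init]
      simp [h]

-- the running-index fold produces exactly the zip of the kept counts with their prefix sums
lemma foldl_run_eq_zip_accum :
    ∀ (l : List Int) (acc : List (List Int)) (s : Int),
      (l.foldl (fun (st : List (List Int) × Int) a => (st.1 ++ [[st.2, st.2 + a]], st.2 + a)) (acc, s)).1
      = acc ++ (l.zip (pvAccum s l)).map (fun p => [p.2 - p.1, p.2]) := by
  intro l
  induction l with
  | nil => intro acc s; simp [pvAccum]
  | cons a t ih =>
    intro acc s
    simp only [List.foldl_cons, pvAccum, List.zip_cons_cons, List.map_cons]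
    rw [ih]
    simp [List.append_assoc]

-- ===== VERDICT (by name: the statement is the Claim_ definition above) =====
theorem generate_limits_spec : Claim_equal_generate_limits := by
  intro u keep _
  unfold Spec_generate_limits generate_limits generate_limits_alt
  rw [foldl_skip_eq_foldl_filter_map keep (fun st a => (st.1 ++ [[st.2, st.2 + a]], st.2 + a))]
  rw [foldl_run_eq_zip_accum]
  simp
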